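-- pv_equiv track=rewrite | github.com/nsu-ai-team/russian_g2p_neuro | prepare_dict.py | check_transcription
-- ===== SOURCE A (Python) =====
-- def check_transcription(phones_list):
--     if len(phones_list) == 0:
--         return False
--     ok = True
--     admissible_characters = set(u'0123456789ABCDEFGHIJKLMNOPQRSTUVWXYZabcdefghijklmnopqrstuvwxyz')
--     for cur_phone in phones_list:
--         if len(cur_phone) == 0:
--             ok = False
--             break
--         if cur_phone[0].isdigit():
--             ok = False
--             break
--         if not(set(cur_phone) <= admissible_characters):
--             ok = False
--             break
--         if not cur_phone[0].isupper():
--             ok = False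
--             break
--     return ok
-- ===== SOURCE B (Python) =====
-- def check_transcription(phones_list):
--     # DFA over the phones flattened into one NUL-separated stream
--     # (NUL can never occur inside a phone string on the printable-ASCII domain)
--     if not phones_list:
--         return False
--     text = '\x00'.join(phones_list) + '\x00'
--     state = 0  # 0: expecting an uppercase phone head, 1: inside a phone body
--     for ch in text:
--         if state == 0:
--             if 'A' <= ch <= 'Z':
--                 state = 1
--             else:
--                 return False
--         elif ch == '\x00':
--             state = 0
--         elif not ('0' <= ch <= '9' or 'A' <= ch <= 'Z' or 'a' <= ch <= 'z'):
--             return False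
--     return state == 0
-- ===== Notes on version B (the rewrite author's own statement) =====
-- stated objective: alternative
-- what changed: Replaced A's per-phone loop with break/ok-flag, per-phone set construction and subset tests by a two-state character DFA run once over all phones flattened into a single NUL-separated stream (NUL cannot appear in printable-ASCII input), using character-range comparisons instead of sets.
import Mathlib
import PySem

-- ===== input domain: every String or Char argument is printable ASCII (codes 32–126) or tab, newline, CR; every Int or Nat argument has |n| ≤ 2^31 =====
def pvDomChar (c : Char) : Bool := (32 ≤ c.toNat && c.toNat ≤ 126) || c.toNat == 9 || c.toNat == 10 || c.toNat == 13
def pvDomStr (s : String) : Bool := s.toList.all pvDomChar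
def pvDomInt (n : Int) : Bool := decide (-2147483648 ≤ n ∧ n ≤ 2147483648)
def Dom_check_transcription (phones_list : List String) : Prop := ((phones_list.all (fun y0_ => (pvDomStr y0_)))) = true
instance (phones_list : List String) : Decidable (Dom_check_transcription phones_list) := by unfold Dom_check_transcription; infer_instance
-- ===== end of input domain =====

-- B replaces A's per-phone loop with set subset tests by a two-state character DFA
-- run once over all phones flattened into one NUL-separated stream (alternative; same cost).

-- ===== PORT A =====
def ctAdmissible : PySem.Set Char :=
  PySem.Set.ofList "0123456789ABCDEFGHIJKLMNOPQRSTUVWXYZabcdefghijklmnopqrstuvwxyz".toList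

-- the for-loop with the ok flag: break-with-ok-False = return false, normal exit = true
def ctLoop : List String → Bool
  | [] => true
  | cur_phone :: rest =>
    match cur_phone.toList with
    | [] => false
    | c :: _ =>
      if PySem.Chars.isdigit c then false
      else if !(PySem.Set.issubset (PySem.Set.ofList cur_phone.toList) ctAdmissible) then false
      else if !(PySem.Chars.isupper c) then false
      else ctLoop rest

def check_transcription (phones_list : List String) : Bool :=
  if phones_list.length == 0 then false
  else ctLoop phones_list

-- ===== PORT B =====
def bNul : Char := Char.ofNat 0

-- '\x00'.join(phones_list), over character lists
def bJoin : List (List Char) → List Char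
  | [] => []
  | [p] => p
  | p :: ps => p ++ bNul :: bJoin ps

-- the for-loop over the stream with early return; at the end, `state == 0`
def bRun : Nat → List Char → Bool
  | st, [] => st == 0
  | 0, ch :: cs => if decide ('A' ≤ ch) && decide (ch ≤ 'Z') then bRun 1 cs else false
  | st, ch :: cs =>
    if ch == bNul then bRun 0 cs
    else if !((decide ('0' ≤ ch) && decide (ch ≤ '9')) ||
              (decide ('A' ≤ ch) && decide (ch ≤ 'Z')) ||
              (decide ('a' ≤ ch) && decide (ch ≤ 'z'))) then false
    else bRun st cs

def check_transcription_alt (phones_list : List String) : Bool :=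
  if phones_list.isEmpty then false
  else bRun 0 (bJoin (phones_list.map String.toList) ++ [bNul])

-- ===== PRECONDITION & SPEC =====
def Spec_check_transcription (phones_list : List String) (out : Bool) : Prop := out = check_transcription_alt phones_list
instance (phones_list : List String) (out : Bool) : Decidable (Spec_check_transcription phones_list out) := by unfold Spec_check_transcription; infer_instance

-- ===== CLAIM (what is proved, stated in full; the proofs are below) =====
def Claim_equal_check_transcription : Prop := ∀ (phones_list : List String), Dom_check_transcription phones_list → Spec_check_transcription phones_list (check_transcription phones_list)

-- ===== LEMMAS AND PROOFS =====

-- B's body-character test as a predicate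
def ctBody (ch : Char) : Bool :=
  (decide ('0' ≤ ch) && decide (ch ≤ '9')) ||
  (decide ('A' ≤ ch) && decide (ch ≤ 'Z')) ||
  (decide ('a' ≤ ch) && decide (ch ≤ 'z'))

def ctHead (ch : Char) : Bool := decide ('A' ≤ ch) && decide (ch ≤ 'Z')

-- what the DFA accepts per phone, as a per-phone predicate
def ctOkPhone : List Char → Bool
  | [] => false
  | c :: cs => ctHead c && cs.all ctBody

-- ASCII character facts, established by enumeration over the 128 codes
set_option maxRecDepth 100000 in
theorem ct_char_mem (n : Nat) (h : n < 128) :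
    decide ((Char.ofNat n) ∈ ctAdmissible) = ctBody (Char.ofNat n) := by
  revert h; revert n; decide

set_option maxRecDepth 100000 in
theorem ct_char_head (n : Nat) (h : n < 128) :
    (!PySem.Chars.isdigit (Char.ofNat n)
      && decide ((Char.ofNat n) ∈ ctAdmissible)
      && PySem.Chars.isupper (Char.ofNat n)) = ctHead (Char.ofNat n) := by
  revert h; revert n; decide

theorem ct_dom_lt (c : Char) (h : pvDomChar c = true) : c.toNat < 128 := by
  simp [pvDomChar] at h
  omega

theorem ct_dom_ne_nul (c : Char) (h : pvDomChar c = true) : c ≠ bNul := by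
  intro he
  have : c.toNat = 0 := by rw [he]; rfl
  simp [pvDomChar, this] at h

theorem ct_char_mem' (c : Char) (h : pvDomChar c = true) :
    decide (c ∈ ctAdmissible) = ctBody c := by
  have := ct_char_mem c.toNat (ct_dom_lt c h)
  rwa [Char.ofNat_toNat] at this

theorem ct_char_head' (c : Char) (h : pvDomChar c = true) :
    (!PySem.Chars.isdigit c && decide (c ∈ ctAdmissible) && PySem.Chars.isupper c)
      = ctHead c := by
  have := ct_char_head c.toNat (ct_dom_lt c h)
  rwa [Char.ofNat_toNat] at this

theorem ct_subset_eq (cs : List Char) :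
    PySem.Set.issubset (PySem.Set.ofList cs) ctAdmissible
      = cs.all (fun d => decide (d ∈ ctAdmissible)) := by
  rcases hb : PySem.Set.issubset (PySem.Set.ofList cs) ctAdmissible with _ | _
  · symm
    rw [Bool.eq_false_iff]
    intro hall
    rw [List.all_eq_true] at hall
    have : PySem.Set.issubset (PySem.Set.ofList cs) ctAdmissible = true := by
      rw [PySem.Set.issubset_iff]
      intro x hx
      rw [PySem.Set.mem_ofList] at hx
      simpa using hall x hx
    rw [hb] at this; exact absurd this (by simp)
  · symm
    rw [PySem.Set.issubset_iff] at hb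
    rw [List.all_eq_true]
    intro x hx
    simpa using hb x (by rw [PySem.Set.mem_ofList]; exact hx)

theorem ct_all_eq (l : List Char) (h : ∀ d ∈ l, pvDomChar d = true) :
    l.all (fun d => decide (d ∈ ctAdmissible)) = l.all ctBody := by
  induction l with
  | nil => simp
  | cons x xs ih =>
    rw [List.all_cons, List.all_cons, ct_char_mem' x (h x (List.mem_cons_self ..)),
      ih (fun d hd => h d (List.mem_cons_of_mem _ hd))]

-- A's if-chain inside the loop body, as a boolean conjunction
theorem ct_chain (d s u : Bool) :
    (if d = true then false else if (!s) = true then false else if (!u) = true then false else true)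
      = (!d && s && u) := by
  cases d <;> cases s <;> cases u <;> rfl

-- one loop step of A: the phone's chain of tests, && the rest of the loop
theorem ct_loop_cons (p : String) (rest : List String) :
    ctLoop (p :: rest)
      = ((match p.toList with
          | [] => false
          | c :: _ =>
            if PySem.Chars.isdigit c then false
            else if !(PySem.Set.issubset (PySem.Set.ofList p.toList) ctAdmissible) then false
            else if !(PySem.Chars.isupper c) then false
            else true) && ctLoop rest) := by
  show (match p.toList with
        | [] => false
        | c :: _ =>
          if PySem.Chars.isdigit c then false
          else if !(PySem.Set.issubset (PySem.Set.ofList p.toList) ctAdmissible) then false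
          else if !(PySem.Chars.isupper c) then false
          else ctLoop rest) = _
  rcases p.toList with _ | ⟨c, cs⟩
  · simp
  · dsimp only
    split_ifs <;> simp

-- per-phone: A's chain of tests equals the DFA's per-phone predicate, for a Dom string
theorem ct_phone_eq (p : String) (h : pvDomStr p = true) :
    (match p.toList with
     | [] => false
     | c :: _ =>
       if PySem.Chars.isdigit c then false
       else if !(PySem.Set.issubset (PySem.Set.ofList p.toList) ctAdmissible) then false
       else if !(PySem.Chars.isupper c) then false
       else true) = ctOkPhone p.toList := by
  have hdom : ∀ d ∈ p.toList, pvDomChar d = true := by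
    have := h; simp [pvDomStr, List.all_eq_true] at this; exact this
  rcases hp : p.toList with _ | ⟨c, rest⟩
  · rfl
  · have hc : pvDomChar c = true := hdom c (by rw [hp]; exact List.mem_cons_self ..)
    have hrest : ∀ d ∈ rest, pvDomChar d = true := fun d hd =>
      hdom d (by rw [hp]; exact List.mem_cons_of_mem _ hd)
    dsimp only [ctOkPhone]
    rw [ct_chain, ct_subset_eq, List.all_cons, ct_all_eq rest hrest, ← ct_char_head' c hc]
    cases PySem.Chars.isdigit c <;> cases decide (c ∈ ctAdmissible) <;>
      cases PySem.Chars.isupper c <;> simp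

-- the DFA from state 1 over a NUL-free body, then NUL, then the rest of the stream
theorem ct_run1 (cs rest : List Char) (h : ∀ d ∈ cs, d ≠ bNul) :
    bRun 1 (cs ++ bNul :: rest) = (cs.all ctBody && bRun 0 rest) := by
  induction cs with
  | nil => simp [bRun]
  | cons x xs ih =>
    have hx : x ≠ bNul := h x (List.mem_cons_self ..)
    show (if x == bNul then bRun 0 (xs ++ bNul :: rest)
          else if !ctBody x then false else bRun 1 (xs ++ bNul :: rest)) = _
    rw [if_neg (by simpa using hx)]
    rcases hb : ctBody x with _ | _
    · simp [List.all_cons, hb]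
    · simp [hb, ih (fun d hd => h d (List.mem_cons_of_mem _ hd))]

-- the DFA from state 0 over one phone segment then the rest of the stream
theorem ct_seg (p rest : List Char) (h : ∀ d ∈ p, d ≠ bNul) :
    bRun 0 (p ++ bNul :: rest) = (ctOkPhone p && bRun 0 rest) := by
  rcases p with _ | ⟨c, cs⟩
  · show (if ctHead bNul then bRun 1 rest else false) = _
    have : ctHead bNul = false := by decide
    simp [this, ctOkPhone]
  · show (if ctHead c then bRun 1 (cs ++ bNul :: rest) else false) = _
    rcases hc : ctHead c with _ | _
    · simp [ctOkPhone, hc]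
    · rw [if_pos rfl, ct_run1 cs rest (fun d hd => h d (List.mem_cons_of_mem _ hd))]
      simp [ctOkPhone, hc]

-- the whole stream: the DFA equals the conjunction of the per-phone predicates
theorem ct_join_eq (l : List String) (hne : l ≠ []) (h : l.all pvDomStr = true) :
    bRun 0 (bJoin (l.map String.toList) ++ [bNul]) = l.all (fun p => ctOkPhone p.toList) := by
  induction l with
  | nil => exact absurd rfl hne
  | cons p rest ih =>
    rw [List.all_cons, Bool.and_eq_true] at h
    have hnul : ∀ d ∈ p.toList, d ≠ bNul := by
      have := h.1; simp [pvDomStr, List.all_eq_true] at this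
      exact fun d hd => ct_dom_ne_nul d (this d hd)
    rcases rest with _ | ⟨q, rs⟩
    · show bRun 0 (p.toList ++ bNul :: []) = _
      rw [ct_seg p.toList [] hnul]
      simp [bRun]
    · have hj : bJoin ((p :: q :: rs).map String.toList)
          = p.toList ++ bNul :: bJoin ((q :: rs).map String.toList) := by
        simp [bJoin]
      rw [hj, List.append_assoc, List.cons_append,
        ct_seg p.toList _ hnul, ih (by simp) h.2]
      simp

theorem ct_loop_eq (l : List String) (h : l.all pvDomStr = true) :
    ctLoop l = l.all (fun p => ctOkPhone p.toList) := by
  induction l with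
  | nil => rfl
  | cons p rest ih =>
    rw [List.all_cons, Bool.and_eq_true] at h
    rw [ct_loop_cons, ct_phone_eq p h.1, ih h.2, List.all_cons]

-- ===== VERDICT (by name: the statement is the Claim_ definition above) =====
theorem check_transcription_spec : Claim_equal_check_transcription := by
  intro phones_list hdom
  unfold Spec_check_transcription check_transcription check_transcription_alt
  unfold Dom_check_transcription at hdom
  rcases phones_list with _ | ⟨p, rest⟩
  · rfl
  · rw [if_neg (by simp), if_neg (by simp)]
    rw [ct_loop_eq _ hdom, ct_join_eq _ (by simp) hdom]
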